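-- pv_equiv track=rewrite | github.com/jeSager/master | 350work/350program2/junk_from_my_dir/pythonforngrams/gettrigrams.py | computeFreqs
-- ===== SOURCE A (Python) =====
-- from collections import defaultdict
--
-- def computeFreqs(words, stopwords):
--     freqsGood = defaultdict(int)
--     freqsStop = defaultdict(int)
--     for word in words:
--         if word in stopwords:
--             freqsStop[word] += 1
--         else:
--             freqsGood[word] += 1
--
--     return freqsGood, freqsStop
-- ===== SOURCE B (Python) =====
-- from collections import defaultdict
--
-- def computeFreqs(words, stopwords):
--     # Count every word once, then classify the distinct keys against a set.
--     counts = {}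
--     for w in words:
--         counts[w] = counts.get(w, 0) + 1
--     stopset = set(stopwords)
--     freqsGood = defaultdict(int)
--     freqsStop = defaultdict(int)
--     for w, c in counts.items():
--         if w in stopset:
--             freqsStop[w] = c
--         else:
--             freqsGood[w] = c
--     return freqsGood, freqsStop
-- ===== Notes on version B (the rewrite author's own statement) =====
-- stated objective: alternative
-- what changed: B builds one frequency table over all words first, then classifies each distinct key once against a precomputed stopword set, instead of testing every occurrence against the stopword list and incrementing per occurrence.
import Mathlib
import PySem

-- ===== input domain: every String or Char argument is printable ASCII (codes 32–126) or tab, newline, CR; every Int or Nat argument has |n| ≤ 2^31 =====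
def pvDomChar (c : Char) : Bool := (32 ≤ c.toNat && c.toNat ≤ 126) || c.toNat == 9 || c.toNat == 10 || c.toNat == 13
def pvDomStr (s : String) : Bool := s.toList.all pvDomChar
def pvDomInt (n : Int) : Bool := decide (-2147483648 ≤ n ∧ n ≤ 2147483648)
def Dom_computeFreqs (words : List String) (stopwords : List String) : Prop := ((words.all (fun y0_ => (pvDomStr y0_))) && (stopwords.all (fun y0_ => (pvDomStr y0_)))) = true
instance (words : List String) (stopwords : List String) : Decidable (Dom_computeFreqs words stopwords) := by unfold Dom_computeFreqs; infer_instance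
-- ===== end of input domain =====

-- B counts all words into one frequency table first, then classifies each distinct key once
-- against a stopword set, instead of A's per-occurrence membership test on the stopword list.

-- ===== PORT A =====
def computeFreqs (words : List String) (stopwords : List String) : (List (String × Int)) × (List (String × Int)) :=
  let r := words.foldl
    (fun (gs : PySem.Dict String Int × PySem.Dict String Int) word =>
      if stopwords.contains word then
        (gs.1, gs.2.modify word 0 (· + 1))
      else
        (gs.1.modify word 0 (· + 1), gs.2))
    (PySem.Dict.empty, PySem.Dict.empty)
  (r.1.items, r.2.items)

-- ===== PORT B =====
def computeFreqs_alt (words : List String) (stopwords : List String) : (List (String × Int)) × (List (String × Int)) :=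
  let counts := words.foldl (fun (d : PySem.Dict String Int) w => d.insert w (d.getD w 0 + 1)) PySem.Dict.empty
  let stopset := PySem.Set.ofList stopwords
  let r := counts.items.foldl
    (fun (gs : PySem.Dict String Int × PySem.Dict String Int) wc =>
      if PySem.Set.contains stopset wc.1 then
        (gs.1, gs.2.insert wc.1 wc.2)
      else
        (gs.1.insert wc.1 wc.2, gs.2))
    (PySem.Dict.empty, PySem.Dict.empty)
  (r.1.items, r.2.items)

-- ===== PRECONDITION & SPEC =====
def Spec_computeFreqs (words : List String) (stopwords : List String) (out : (List (String × Int)) × (List (String × Int))) : Prop := out = computeFreqs_alt words stopwords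
instance (words : List String) (stopwords : List String) (out : (List (String × Int)) × (List (String × Int))) : Decidable (Spec_computeFreqs words stopwords out) := by unfold Spec_computeFreqs; infer_instance

-- ===== CLAIM (what is proved, stated in full; the proofs are below) =====
def Claim_equal_computeFreqs : Prop := ∀ (words : List String) (stopwords : List String), Dom_computeFreqs words stopwords → Spec_computeFreqs words stopwords (computeFreqs words stopwords)

-- ===== LEMMAS AND PROOFS =====

-- A's single loop with two accumulators is the two counting loops over the filtered lists.
theorem pvSplitFold (p : String → Bool) :
    ∀ (ws : List String) (g s : PySem.Dict String Int),
      ws.foldl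
        (fun (gs : PySem.Dict String Int × PySem.Dict String Int) w =>
          if p w then (gs.1, gs.2.modify w 0 (· + 1)) else (gs.1.modify w 0 (· + 1), gs.2))
        (g, s)
      = ((ws.filter (fun w => !p w)).foldl (fun d w => d.modify w 0 (· + 1)) g,
         (ws.filter p).foldl (fun d w => d.modify w 0 (· + 1)) s) := by
  intro ws
  induction ws with
  | nil => intro g s; simp
  | cons w rest ih =>
      intro g s
      by_cases h : p w = true
      · simp [List.foldl_cons, h, ih]
      · simp only [Bool.not_eq_true] at h
        simp [List.foldl_cons, h, ih]

-- B's classification loop over fresh, distinct keys appends each pair to one side.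
theorem pvClassifyFold (p : String → Bool) :
    ∀ (L : List (String × Int)) (g s : PySem.Dict String Int),
      (L.map (·.1)).Nodup →
      (∀ q ∈ L, g.contains q.1 = false) →
      (∀ q ∈ L, s.contains q.1 = false) →
      (L.foldl
        (fun (gs : PySem.Dict String Int × PySem.Dict String Int) wc =>
          if p wc.1 then (gs.1, gs.2.insert wc.1 wc.2) else (gs.1.insert wc.1 wc.2, gs.2))
        (g, s)).1.items = g.items ++ L.filter (fun wc => !p wc.1)
      ∧ (L.foldl
        (fun (gs : PySem.Dict String Int × PySem.Dict String Int) wc =>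
          if p wc.1 then (gs.1, gs.2.insert wc.1 wc.2) else (gs.1.insert wc.1 wc.2, gs.2))
        (g, s)).2.items = s.items ++ L.filter (fun wc => p wc.1) := by
  intro L
  induction L with
  | nil => intro g s _ _ _; simp
  | cons q rest ih =>
      intro g s hnd hg hs
      have hnd' := List.nodup_cons.mp hnd
      have hndrest : (rest.map (·.1)).Nodup := hnd'.2
      have hqrest : ∀ r ∈ rest, r.1 ≠ q.1 := by
        intro r hr heq
        have hm : r.1 ∈ rest.map (·.1) := List.mem_map_of_mem hr
        exact hnd'.1 (show q.1 ∈ rest.map (·.1) from heq ▸ hm)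
      by_cases h : p q.1 = true
      · have hs' : ∀ r ∈ rest, (s.insert q.1 q.2).contains r.1 = false := by
          intro r hr
          rw [PySem.Dict.contains_insert]
          simp [hqrest r hr, hs r (List.mem_cons_of_mem _ hr)]
        have hih := ih g (s.insert q.1 q.2) hndrest
          (fun r hr => hg r (List.mem_cons_of_mem _ hr)) hs'
        simp only [List.foldl_cons, h, if_true]
        refine ⟨?_, ?_⟩
        · rw [hih.1, List.filter_cons]; simp [h]
        · rw [hih.2,
            PySem.Dict.items_insert_of_not_contains _ _ (hs q (List.mem_cons_self ..)),
            List.filter_cons]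
          simp [h]
      · simp only [Bool.not_eq_true] at h
        have hg' : ∀ r ∈ rest, (g.insert q.1 q.2).contains r.1 = false := by
          intro r hr
          rw [PySem.Dict.contains_insert]
          simp [hqrest r hr, hg r (List.mem_cons_of_mem _ hr)]
        have hih := ih (g.insert q.1 q.2) s hndrest hg'
          (fun r hr => hs r (List.mem_cons_of_mem _ hr))
        simp only [List.foldl_cons, h, Bool.false_eq_true, if_false]
        refine ⟨?_, ?_⟩
        · rw [hih.1,
            PySem.Dict.items_insert_of_not_contains _ _ (hg q (List.mem_cons_self ..)),
            List.filter_cons]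
          simp [h]
        · rw [hih.2, List.filter_cons]; simp [h]

-- dedup commutes with filter (first-occurrence order is preserved).
theorem pvOfListFilter (q : String → Bool) (xs : List String) :
    PySem.Set.ofList (xs.filter q) = (PySem.Set.ofList xs).filter q := by
  induction xs using List.reverseRecOn with
  | nil => simp [PySem.Set.ofList_nil]
  | append_singleton xs x ih =>
      by_cases h : q x = true
      · rw [List.filter_append, List.filter_cons]
        simp only [h, if_true, List.filter_nil]
        rw [PySem.Set.ofList_append_singleton, PySem.Set.ofList_append_singleton, ih]
        by_cases hx : x ∈ xs
        · have h1 : x ∈ PySem.Set.ofList xs := (PySem.Set.mem_ofList _ _).mpr hx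
          have h2 : x ∈ (PySem.Set.ofList xs).filter q :=
            List.mem_filter.mpr ⟨h1, h⟩
          rw [PySem.Set.add_of_mem h2, PySem.Set.add_of_mem h1]
        · have h1 : x ∉ PySem.Set.ofList xs := fun hm => hx ((PySem.Set.mem_ofList _ _).mp hm)
          have h2 : x ∉ (PySem.Set.ofList xs).filter q := fun hm => h1 (List.mem_filter.mp hm).1
          rw [PySem.Set.add_of_not_mem h2, PySem.Set.add_of_not_mem h1,
            List.filter_append, List.filter_cons]
          simp [h]
      · simp only [Bool.not_eq_true] at h
        rw [List.filter_append, List.filter_cons]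
        simp only [h, Bool.false_eq_true, if_false, List.filter_nil, List.append_nil, ih]
        rw [PySem.Set.ofList_append_singleton]
        by_cases hx : x ∈ xs
        · rw [PySem.Set.add_of_mem ((PySem.Set.mem_ofList _ _).mpr hx)]
        · rw [PySem.Set.add_of_not_mem (fun hm => hx ((PySem.Set.mem_ofList _ _).mp hm)),
            List.filter_append, List.filter_cons]
          simp [h]

theorem pvSetContains (stopwords : List String) (w : String) :
    PySem.Set.contains (PySem.Set.ofList stopwords) w = stopwords.contains w := by
  by_cases h : w ∈ stopwords
  · rw [(PySem.Set.contains_iff _ _).mpr ((PySem.Set.mem_ofList _ _).mpr h)]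
    simp [h]
  · simp [h, List.contains_eq_mem, PySem.Set.mem_ofList]

-- counting loop over a filtered list, as items
theorem pvCounterFilterItems (q : String → Bool) (ws : List String) :
    (PySem.Dict.counter (ws.filter q)).items
      = ((PySem.Set.ofList ws).filter q).map (fun k => (k, (ws.count k : Int))) := by
  rw [PySem.Dict.items_counter, pvOfListFilter]
  apply List.map_congr_left
  intro k hk
  have hq : q k = true := (List.mem_filter.mp hk).2
  simp [List.count_filter, hq]

-- ===== VERDICT (by name: the statement is the Claim_ definition above) =====
theorem computeFreqs_spec : Claim_equal_computeFreqs := by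
  intro words stopwords _
  unfold Spec_computeFreqs computeFreqs computeFreqs_alt
  simp only [pvSetContains]
  rw [PySem.Dict.foldl_insert_getD_add_one_eq_counter]
  have hA := pvSplitFold (fun w => stopwords.contains w) words
    PySem.Dict.empty PySem.Dict.empty
  have hndL : ((PySem.Dict.counter words).items.map (·.1)).Nodup :=
    PySem.Dict.nodup_keys_counter (xs := words)
  have hB := pvClassifyFold (fun w => stopwords.contains w)
    (PySem.Dict.counter words).items PySem.Dict.empty PySem.Dict.empty
    hndL (fun _ _ => PySem.Dict.contains_empty ..) (fun _ _ => PySem.Dict.contains_empty ..)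
  rw [hA, hB.1, hB.2]
  simp only [show (PySem.Dict.empty : PySem.Dict String Int).items = [] from rfl, List.nil_append]
  rw [← PySem.Dict.counter_eq_foldl, ← PySem.Dict.counter_eq_foldl,
    pvCounterFilterItems, pvCounterFilterItems,
    PySem.Dict.items_counter, List.filter_map, List.filter_map]
  rfl
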